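-- pv_equiv track=rewrite | github.com/Indemsys/MC80_4DC | src/ParametersGenerator/Align_DB_columns.py | parse_data_row_elements
-- ===== SOURCE A (Python) =====
-- from typing import List
--
-- def parse_data_row_elements(row_line_str: str) -> List[str]:
--     """
--     Разбирает строку данных JSON-массива на элементы.
--     Пример строки: '[ "element1", 123, "escaped \\"quote\\"", null ]'
--     Возвращает список строковых представлений элементов.
--     """
--     processed_line = row_line_str.strip()
--     # Удаляем возможную запятую в конце строки (если это последняя строка в массиве перед закрывающей ']')
--     if processed_line.endswith(','):
--         processed_line = processed_line[:-1]
--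
--     # Проверяем, что строка действительно является массивом
--     if not (processed_line.startswith('[') and processed_line.endswith(']')):
--         return []
--
--     content_str = processed_line[1:-1].strip()  # Содержимое между скобками
--     if not content_str:  # Пустой массив '[]'
--         return []
--
--     elements = []
--     current_element = ""
--     in_quotes = False
--     escape_next_char = False
--
--     for char in content_str:
--         if escape_next_char:
--             current_element += char
--             escape_next_char = False
--             continue
--
--         if char == '\\':  # Обрабатываем экранирующий символ '\'
--             current_element += char
--             escape_next_char = True  # Следующий символ будет частью текущего элемента как есть
--             continue
--
--         if char == '"':
--             in_quotes = not in_quotes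
--             current_element += char
--         elif char == ',' and not in_quotes:  # Разделитель элементов, только если не внутри кавычек
--             elements.append(current_element.strip())
--             current_element = ""
--         else:
--             current_element += char
--
--     elements.append(current_element.strip())  # Добавляем последний (или единственный) элемент
--     return elements
-- ===== SOURCE B (Python) =====
-- from typing import List
--
-- def _find_top_level_comma(s: str) -> int:
--     """Index of the first comma outside quotes/escape, or -1."""
--     in_quotes = False
--     escape_next = False
--     for i, ch in enumerate(s):
--         if escape_next:
--             escape_next = False
--         elif ch == '\\':
--             escape_next = True
--         elif ch == '"':
--             in_quotes = not in_quotes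
--         elif ch == ',' and not in_quotes:
--             return i
--     return -1
--
-- def _split_top_level(s: str) -> List[str]:
--     i = _find_top_level_comma(s)
--     if i == -1:
--         return [s.strip()]
--     return [s[:i].strip()] + _split_top_level(s[i + 1:])
--
-- def parse_data_row_elements(row_line_str: str) -> List[str]:
--     processed_line = row_line_str.strip()
--     if processed_line.endswith(','):
--         processed_line = processed_line[:-1]
--     if not (processed_line.startswith('[') and processed_line.endswith(']')):
--         return []
--     content_str = processed_line[1:-1].strip()
--     if not content_str:
--         return []
--     return _split_top_level(content_str)
-- ===== Notes on version B (the rewrite author's own statement) =====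
-- stated objective: alternative
-- what changed: A accumulates each element character-by-character with one stateful accumulator loop; B instead recursively finds the index of the next top-level (unquoted, unescaped) comma and slices the content into segments, stripping each.
import Mathlib
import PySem

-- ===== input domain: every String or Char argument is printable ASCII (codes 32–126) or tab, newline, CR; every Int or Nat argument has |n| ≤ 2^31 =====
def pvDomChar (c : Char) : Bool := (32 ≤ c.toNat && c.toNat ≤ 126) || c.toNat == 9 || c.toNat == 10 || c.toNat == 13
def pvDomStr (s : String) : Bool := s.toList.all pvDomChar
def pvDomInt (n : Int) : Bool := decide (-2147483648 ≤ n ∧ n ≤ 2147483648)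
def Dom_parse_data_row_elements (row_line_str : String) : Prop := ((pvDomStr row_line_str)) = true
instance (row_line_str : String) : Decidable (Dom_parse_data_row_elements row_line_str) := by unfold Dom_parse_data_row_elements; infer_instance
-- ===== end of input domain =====

-- B replaces A's single-pass character-accumulator with a recursive find-next-top-level-comma + slice
-- decomposition (objective: alternative decomposition, same cost).

-- ===== PORT A =====
-- one loop step of A's for-loop; state = (elements, current_element as its char list, in_quotes, escape_next_char)
def pvStepA (st : List String × List Char × Bool × Bool) (c : Char) :
    List String × List Char × Bool × Bool :=
  let (elems, cur, inq, esc) := st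
  if esc then (elems, cur ++ [c], inq, false)
  else if c = '\\' then (elems, cur ++ [c], inq, true)
  else if c = '"' then (elems, cur ++ [c], !inq, esc)
  else if c = ',' ∧ inq = false then (elems ++ [String.ofList (PySem.Chars.strip cur)], [], inq, esc)
  else (elems, cur ++ [c], inq, esc)

def parse_data_row_elements (row_line_str : String) : List String :=
  let processed_line := PySem.Str.strip row_line_str
  let processed_line :=
    if PySem.Str.endswith processed_line "," then PySem.Str.slice processed_line none (some (-1))
    else processed_line
  if ¬(PySem.Str.startswith processed_line "[" ∧ PySem.Str.endswith processed_line "]") then []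
  else
    let content_str := PySem.Str.strip (PySem.Str.slice processed_line (some 1) (some (-1)))
    if content_str = "" then []
    else
      -- for char in content_str: … (strings iterated as their code-point lists; exact)
      let st := content_str.toList.foldl pvStepA ([], [], false, false)
      -- elements, current_element read back from the final loop state (tuple projections)
      st.1 ++ [String.ofList (PySem.Chars.strip st.2.1)]

-- ===== PORT B =====
-- _find_top_level_comma: the enumerate-loop ported as structural recursion; the running index
-- becomes +1 on the way back out, -1 is kept as the not-found sentinel (exact).
def pvFindTopComma (inq esc : Bool) : List Char → Int
  | [] => -1
  | c :: cs =>
    if esc then (let r := pvFindTopComma inq false cs; if r = -1 then -1 else r + 1)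
    else if c = '\\' then (let r := pvFindTopComma inq true cs; if r = -1 then -1 else r + 1)
    else if c = '"' then (let r := pvFindTopComma (!inq) esc cs; if r = -1 then -1 else r + 1)
    else if c = ',' ∧ inq = false then 0
    else (let r := pvFindTopComma inq esc cs; if r = -1 then -1 else r + 1)

-- result of pvFindTopComma is -1 or a position inside the list (used for termination below)
theorem pvShiftRange (c : Char) (cs : List Char) (r : Int)
    (h : r = -1 ∨ (0 ≤ r ∧ r < (cs.length : Int))) :
    (if r = -1 then (-1 : Int) else r + 1) = -1 ∨
      (0 ≤ (if r = -1 then (-1 : Int) else r + 1) ∧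
        (if r = -1 then (-1 : Int) else r + 1) < ((c :: cs).length : Int)) := by
  rcases h with h | ⟨h0, hl⟩
  · left; simp [h]
  · right
    have hne : r ≠ -1 := by omega
    simp only [if_neg hne, List.length_cons]
    push_cast
    omega

theorem pvFindTopComma_range (s : List Char) : ∀ inq esc,
    pvFindTopComma inq esc s = -1 ∨
      (0 ≤ pvFindTopComma inq esc s ∧ pvFindTopComma inq esc s < s.length) := by
  induction s with
  | nil => intro inq esc; left; rfl
  | cons c cs ih =>
    intro inq esc
    simp only [pvFindTopComma]
    by_cases h1 : esc = true
    · simp only [if_pos h1]; exact pvShiftRange c cs _ (ih inq false)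
    · simp only [if_neg h1]
      by_cases h2 : c = '\\'
      · simp only [if_pos h2]; exact pvShiftRange c cs _ (ih inq true)
      · simp only [if_neg h2]
        by_cases h3 : c = '"'
        · simp only [if_pos h3]; exact pvShiftRange c cs _ (ih (!inq) esc)
        · simp only [if_neg h3]
          by_cases h4 : c = ',' ∧ inq = false
          · simp only [if_pos h4]
            right
            constructor
            · norm_num
            · simp only [List.length_cons]; push_cast; omega
          · simp only [if_neg h4]; exact pvShiftRange c cs _ (ih inq esc)

-- _split_top_level: Python str ported on its code-point list; s[:i] / s[i+1:] are take / drop (exact)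
def pvSplitTopLevel (s : List Char) : List String :=
  let i := pvFindTopComma false false s
  if h : i = -1 then [String.ofList (PySem.Chars.strip s)]
  else
    String.ofList (PySem.Chars.strip (s.take i.toNat)) :: pvSplitTopLevel (s.drop (i.toNat + 1))
termination_by s.length
decreasing_by
  rcases pvFindTopComma_range s false false with h' | ⟨h0, hl⟩
  · exact absurd h' h
  · simp only [List.length_drop]; omega

def parse_data_row_elements_alt (row_line_str : String) : List String :=
  let processed_line := PySem.Str.strip row_line_str
  let processed_line :=
    if PySem.Str.endswith processed_line "," then PySem.Str.slice processed_line none (some (-1))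
    else processed_line
  if ¬(PySem.Str.startswith processed_line "[" ∧ PySem.Str.endswith processed_line "]") then []
  else
    let content_str := PySem.Str.strip (PySem.Str.slice processed_line (some 1) (some (-1)))
    if content_str = "" then []
    else pvSplitTopLevel content_str.toList

-- ===== PRECONDITION & SPEC =====
def Spec_parse_data_row_elements (row_line_str : String) (out : List String) : Prop := out = parse_data_row_elements_alt row_line_str
instance (row_line_str : String) (out : List String) : Decidable (Spec_parse_data_row_elements row_line_str out) := by unfold Spec_parse_data_row_elements; infer_instance

-- ===== CLAIM (what is proved, stated in full; the proofs are below) =====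
def Claim_equal_parse_data_row_elements : Prop := ∀ (row_line_str : String), Dom_parse_data_row_elements row_line_str → Spec_parse_data_row_elements row_line_str (parse_data_row_elements row_line_str)

-- ===== LEMMAS AND PROOFS =====

-- finish A's loop: append the stripped current element to the collected elements
def pvFinish (st : List String × List Char × Bool × Bool) : List String :=
  st.1 ++ [String.ofList (PySem.Chars.strip st.2.1)]

-- the common "index shifted by one" step of the four pass-through branches of the loop
theorem pvShiftCase (c : Char) (cs : List Char) (elems : List String) (cur : List Char)
    (inq' esc' : Bool) :
    (let r := (let r0 := pvFindTopComma inq' esc' cs; if r0 = -1 then -1 else r0 + 1)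
     if r = -1 then elems ++ [String.ofList (PySem.Chars.strip (cur ++ c :: cs))]
     else pvFinish (((c :: cs).drop (r.toNat + 1)).foldl pvStepA
            (elems ++ [String.ofList (PySem.Chars.strip (cur ++ (c :: cs).take r.toNat))],
              [], false, false)))
    =
    (let r0 := pvFindTopComma inq' esc' cs
     if r0 = -1 then elems ++ [String.ofList (PySem.Chars.strip ((cur ++ [c]) ++ cs))]
     else pvFinish ((cs.drop (r0.toNat + 1)).foldl pvStepA
            (elems ++ [String.ofList (PySem.Chars.strip ((cur ++ [c]) ++ cs.take r0.toNat))],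
              [], false, false))) := by
  rcases pvFindTopComma_range cs inq' esc' with h | ⟨h0, _⟩
  · simp [h]
  · have hne : pvFindTopComma inq' esc' cs ≠ -1 := by omega
    have hne1 : pvFindTopComma inq' esc' cs + 1 ≠ -1 := by omega
    have ht : (pvFindTopComma inq' esc' cs + 1).toNat
        = (pvFindTopComma inq' esc' cs).toNat + 1 := by omega
    simp only [hne, hne1, if_false, ht, List.take_succ_cons, List.drop_succ_cons,
      List.append_assoc, List.cons_append, List.nil_append]

-- A's loop, finished, equals: emit everything up to the first top-level comma, restart after it
theorem pvLoop_split (s : List Char) : ∀ (elems : List String) (cur : List Char) (inq esc : Bool),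
    pvFinish (s.foldl pvStepA (elems, cur, inq, esc)) =
      (let r := pvFindTopComma inq esc s
       if r = -1 then elems ++ [String.ofList (PySem.Chars.strip (cur ++ s))]
       else pvFinish ((s.drop (r.toNat + 1)).foldl pvStepA
             (elems ++ [String.ofList (PySem.Chars.strip (cur ++ s.take r.toNat))], [], false, false))) := by
  induction s with
  | nil => intro elems cur inq esc; simp [pvFindTopComma, pvFinish]
  | cons c cs ih =>
    intro elems cur inq esc
    by_cases h1 : esc = true
    · simp only [List.foldl_cons, pvStepA, pvFindTopComma, if_pos h1]
      rw [ih]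
      exact (pvShiftCase c cs elems cur inq false).symm
    · by_cases h2 : c = '\\'
      · simp only [List.foldl_cons, pvStepA, pvFindTopComma, if_neg h1, if_pos h2]
        rw [ih]
        exact (pvShiftCase c cs elems cur inq true).symm
      · by_cases h3 : c = '"'
        · simp only [List.foldl_cons, pvStepA, pvFindTopComma, if_neg h1, if_neg h2, if_pos h3]
          rw [ih]
          exact (pvShiftCase c cs elems cur (!inq) esc).symm
        · by_cases h4 : c = ',' ∧ inq = false
          · obtain ⟨hc, hq⟩ := h4
            subst hc
            subst hq
            have hesc : esc = false := by
              cases esc with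
              | false => rfl
              | true => exact absurd rfl h1
            subst hesc
            simp only [List.foldl_cons, pvStepA, pvFindTopComma, if_neg h1, if_neg h2, if_neg h3]
            simp
          · simp only [List.foldl_cons, pvStepA, pvFindTopComma, if_neg h1, if_neg h2, if_neg h3,
              if_neg h4]
            rw [ih]
            exact (pvShiftCase c cs elems cur inq esc).symm

-- the finished loop from a fresh segment state equals B's recursive splitter
theorem pvLoop_eq_split (n : Nat) : ∀ (s : List Char), s.length ≤ n → ∀ (elems : List String),
    pvFinish (s.foldl pvStepA (elems, [], false, false)) = elems ++ pvSplitTopLevel s := by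
  induction n with
  | zero =>
    intro s hs elems
    have : s = [] := List.eq_nil_of_length_eq_zero (by omega)
    subst this
    simp [pvFinish, pvSplitTopLevel, pvFindTopComma]
  | succ n ih =>
    intro s hs elems
    rw [pvLoop_split]
    rw [pvSplitTopLevel]
    rcases pvFindTopComma_range s false false with h | ⟨h0, hl⟩
    · simp [h]
    · have hne : pvFindTopComma false false s ≠ -1 := by omega
      simp only [hne, if_false]
      rw [ih]
      · simp
      · simp only [List.length_drop]; omega

-- the loop-then-finish computation from the initial state equals B's splitter
theorem pvMain (cs : List Char) :
    (List.foldl pvStepA ([], [], false, false) cs).1 ++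
        [String.ofList (PySem.Chars.strip (List.foldl pvStepA ([], [], false, false) cs).2.1)] =
      pvSplitTopLevel cs := by
  have h := pvLoop_eq_split cs.length cs le_rfl []
  simpa [pvFinish] using h

-- ===== VERDICT (by name: the statement is the Claim_ definition above) =====
theorem parse_data_row_elements_spec : Claim_equal_parse_data_row_elements := by
  intro s _
  unfold Spec_parse_data_row_elements
  simp only [parse_data_row_elements, parse_data_row_elements_alt]
  split_ifs <;> first
    | exact pvMain _
    | rfl
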